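-- pv_equiv track=rewrite | github.com/jkjan/PS | Kakao 2020 Intern/3.py | solution
-- ===== SOURCE A (Python) =====
-- def solution(gems):
--     for_now = {}
--     s, e = 1, 1
--     for_now[gems[0]] = 1
--     for i, g in enumerate(gems[1:]):
--         if g not in for_now.keys():
--             s = min([v for v in for_now.values()])
--             e = i + 2
--         for_now[g] = i + 2
--
--     return [s, e]
-- ===== SOURCE B (Python) =====
-- def solution(gems):
--     # One pass: p = 1-based position of the last first-occurrence; then build
--     # last-occurrence positions over the prefix before p and take their min.
--     seen = set()
--     p = 1
--     for i, g in enumerate(gems):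
--         if g not in seen:
--             seen.add(g)
--             p = i + 1
--     if p == 1:
--         return [1, 1]
--     last = {}
--     for i in range(p - 1):
--         last[gems[i]] = i + 1
--     return [min(last.values()), p]
-- ===== Notes on version B (the rewrite author's own statement) =====
-- stated objective: faster
-- what changed: Instead of recomputing min(for_now.values()) inside the loop at every new gem (O(n*d)), B finds the position p of the last first-occurrence in one pass, then builds last-occurrence positions only for the prefix before p and takes one min, giving O(n).
import Mathlib
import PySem

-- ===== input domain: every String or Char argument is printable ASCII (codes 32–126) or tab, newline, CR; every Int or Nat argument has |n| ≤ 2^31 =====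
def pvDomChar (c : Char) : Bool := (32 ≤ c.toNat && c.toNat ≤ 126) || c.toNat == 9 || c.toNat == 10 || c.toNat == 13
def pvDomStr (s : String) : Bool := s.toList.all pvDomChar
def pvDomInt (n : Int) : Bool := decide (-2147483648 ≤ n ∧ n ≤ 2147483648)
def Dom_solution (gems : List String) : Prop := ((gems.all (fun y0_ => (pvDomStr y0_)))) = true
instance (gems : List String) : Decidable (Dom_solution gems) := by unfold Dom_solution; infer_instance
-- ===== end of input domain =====

-- B replaces A's per-new-gem rescan of all dict values (O(n*d)) by one pass finding the last
-- first-occurrence position p plus one min over last occurrences before p (O(n)).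

-- ===== PORT A =====
-- the loop 'for i, g in enumerate(gems[1:])' carrying state (s, e, for_now)
def loopA : Int → Int → Int → PySem.Dict String Int → List String → Int × Int × PySem.Dict String Int
  | _, s, e, d, [] => (s, e, d)
  | i, s, e, d, g :: rest =>
    if ¬ d.contains g then
      -- min over a nonempty dict's values; getD 0 is never taken (for_now is nonempty)
      loopA (i+1) ((PySem.List.min? d.values (fun v => v)).getD 0) (i+2) (d.insert g (i+2)) rest
    else
      loopA (i+1) s e (d.insert g (i+2)) rest

def solution (gems : List String) : List Int :=
  match gems with
  | [] => []  -- gems[0] raises IndexError here: excluded by Pre_solution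
  | g0 :: rest =>
    let st := loopA 0 1 1 (PySem.Dict.empty.insert g0 1) rest
    [st.1, st.2.1]

-- ===== PORT B =====
-- first pass of Source B: p = 1-based position of the last first occurrence
def loopB : Int → Int → PySem.Set String → List String → Int
  | _, p, _, [] => p
  | i, p, seen, g :: rest =>
    if ¬ PySem.Set.contains seen g then loopB (i+1) (i+1) (PySem.Set.add seen g) rest
    else loopB (i+1) p seen rest

def solution_alt (gems : List String) : List Int :=
  let p := loopB 0 1 PySem.Set.empty gems
  if p = 1 then [1, 1]
  else
    -- for i in range(p - 1): last[gems[i]] = i + 1   (indices are in range, getD "" never taken)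
    let last := (PySem.List.pyRange 0 (p-1) 1).foldl
      (fun d i => d.insert ((PySem.List.pyGet? gems i).getD "") (i+1)) PySem.Dict.empty
    [(PySem.List.min? last.values (fun v => v)).getD 0, p]

-- ===== PRECONDITION & SPEC =====
-- A evaluates gems[0]: it raises IndexError exactly on the empty list.
def Pre_solution (gems : List String) : Prop := gems ≠ []
instance (gems : List String) : Decidable (Pre_solution gems) := by unfold Pre_solution; infer_instance
def pvWitness_solution : List String := (["a", "b", "a"])

def Spec_solution (gems : List String) (out : List Int) : Prop := out = solution_alt gems
instance (gems : List String) (out : List Int) : Decidable (Spec_solution gems out) := by unfold Spec_solution; infer_instance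

-- ===== CLAIM (what is proved, stated in full; the proofs are below) =====
def Claim_equal_solution : Prop := ∀ (gems : List String), Dom_solution gems → Pre_solution gems → Spec_solution gems (solution gems)

-- ===== LEMMAS AND PROOFS =====

-- proof-only: the dict after inserting the elements of l at positions i+1, i+2, …
def mkD : List String → Int → PySem.Dict String Int → PySem.Dict String Int
  | [], _, d => d
  | g :: r, i, d => mkD r (i+1) (d.insert g (i+1))

theorem set_contains_add (s : PySem.Set String) (x y : String) :
    (PySem.Set.add s x).contains y = ((y == x) || s.contains y) := by
  simp only [PySem.Set.add, PySem.Set.contains, List.contains_eq_mem]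
  by_cases h : x ∈ s <;> by_cases hyx : y = x <;> simp [h, hyx]

theorem loopB_cases : ∀ (l : List String) (i p : Int) (seen : PySem.Set String),
    loopB i p seen l = p ∨ i + 1 ≤ loopB i p seen l := by
  intro l
  induction l with
  | nil => intro i p seen; left; rfl
  | cons g rest ih =>
    intro i p seen
    simp only [loopB]
    split_ifs with h
    · rcases ih (i+1) p seen with h1 | h1
      · left; exact h1
      · right; omega
    · rcases ih (i+1) (i+1) (PySem.Set.add seen g) with h1 | h1 <;> right <;> omega

theorem loopB_le : ∀ (l : List String) (i p : Int) (seen : PySem.Set String),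
    loopB i p seen l ≤ max p (i + l.length) := by
  intro l
  induction l with
  | nil => intro i p seen; simp [loopB]
  | cons g rest ih =>
    intro i p seen
    simp only [loopB, List.length_cons]
    split_ifs with h
    · have := ih (i+1) p seen
      push_cast at *; omega
    · have := ih (i+1) (i+1) (PySem.Set.add seen g)
      push_cast at *; omega

theorem loopA_main : ∀ (l : List String) (i s e : Int) (d : PySem.Dict String Int)
    (seen : PySem.Set String)
    (_hseen : ∀ g, PySem.Set.contains seen g = d.contains g)
    (_he : e ≤ i + 1),
    loopA i s e d l =
      ((if loopB (i+1) e seen l = e then s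
        else (PySem.List.min? ((mkD (l.take (loopB (i+1) e seen l - i - 2).toNat) (i+1) d).values) (fun v => v)).getD 0),
       loopB (i+1) e seen l,
       mkD l (i+1) d) := by
  intro l
  induction l with
  | nil => intro i s e d seen hseen he; simp [loopA, loopB, mkD]
  | cons g rest ih =>
    intro i s e d seen hseen he
    have hstep : (i + 1) + 1 = i + 2 := by ring
    have e3 : ∀ X d', mkD (g :: X) (i+1) d' = mkD X (i+2) (d'.insert g (i+2)) := by
      intro X d'; simp only [mkD, hstep]
    by_cases h : d.contains g = true
    · have e1 : loopA i s e d (g :: rest) = loopA (i+1) s e (d.insert g (i+2)) rest := by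
        simp [loopA, h]
      have hm : g ∈ seen := by
        have h2 := (hseen g).trans h
        simpa using h2
      have e2 : loopB (i+1) e seen (g :: rest) = loopB (i+2) e seen rest := by
        simp [loopB, hm, hstep]
      have hseen' : ∀ x, PySem.Set.contains seen x = (d.insert g (i+2)).contains x := by
        intro x
        rw [PySem.Dict.contains_insert, hseen x]
        by_cases hx : x = g
        · subst hx; simp [h]
        · simp [beq_iff_eq, hx]
      have ihh := ih (i+1) s e (d.insert g (i+2)) seen hseen' (by omega)
      rw [hstep] at ihh
      rw [e1, ihh, e2, e3]
      set P := loopB (i+2) e seen rest with hP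
      congr 1
      split_ifs with h1
      · rfl
      · have h2 : i + 3 ≤ P := by
          rcases loopB_cases rest (i+2) e seen with h3 | h3
          · exact absurd h3 h1
          · omega
        have ht : (P - i - 2).toNat = (P - (i+1) - 2).toNat + 1 := by omega
        rw [ht, List.take_succ_cons, e3]
    · have e1 : loopA i s e d (g :: rest) =
          loopA (i+1) ((PySem.List.min? d.values (fun v => v)).getD 0) (i+2) (d.insert g (i+2)) rest := by
        simp [loopA, h]
      have hm : g ∉ seen := by
        have h2 := hseen g
        simp only [Bool.not_eq_true] at h
        rw [h] at h2
        simpa using h2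
      have e2 : loopB (i+1) e seen (g :: rest) = loopB (i+2) (i+2) (PySem.Set.add seen g) rest := by
        simp [loopB, hm, hstep]
      have hseen' : ∀ x, PySem.Set.contains (PySem.Set.add seen g) x = (d.insert g (i+2)).contains x := by
        intro x
        rw [set_contains_add, PySem.Dict.contains_insert, hseen x, Bool.or_comm]
      have ihh := ih (i+1) ((PySem.List.min? d.values (fun v => v)).getD 0) (i+2)
          (d.insert g (i+2)) (PySem.Set.add seen g) hseen' (by omega)
      rw [hstep] at ihh
      rw [e1, ihh, e2, e3]
      set P := loopB (i+2) (i+2) (PySem.Set.add seen g) rest with hP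
      have hPbig : i + 2 ≤ P := by
        rcases loopB_cases rest (i+2) (i+2) (PySem.Set.add seen g) with h3 | h3 <;> omega
      have hPe : ¬ (P = e) := by omega
      congr 1
      rw [if_neg hPe]
      split_ifs with h1
      · have ht : (P - i - 2).toNat = 0 := by omega
        rw [ht]
        simp [mkD]
      · have h2 : i + 3 ≤ P := by
          rcases loopB_cases rest (i+2) (i+2) (PySem.Set.add seen g) with h3 | h3
          · exact absurd h3 h1
          · omega
        have ht : (P - i - 2).toNat = (P - (i+1) - 2).toNat + 1 := by omega
        rw [ht, List.take_succ_cons, e3]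

theorem rangeFold_eq_mkD (gems : List String) : ∀ (m a : Nat) (d : PySem.Dict String Int),
    a + m ≤ gems.length →
    (PySem.List.pyRange (a : Int) ((a : Int) + (m : Int)) 1).foldl
      (fun d i => d.insert ((PySem.List.pyGet? gems i).getD "") (i+1)) d
    = mkD ((gems.drop a).take m) (a : Int) d := by
  intro m
  induction m with
  | zero =>
    intro a d _
    rw [show ((a:Int) + ((0:Nat):Int)) = (a:Int) by push_cast; ring]
    rw [PySem.List.pyRange_one_eq_nil le_rfl]
    simp [mkD]
  | succ m ih =>
    intro a d hle
    have ha : a < gems.length := by omega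
    rw [PySem.List.pyRange_one_cons (by push_cast; omega)]
    rw [List.foldl_cons]
    have hget : PySem.List.pyGet? gems (a : Int) = some gems[a] := by
      rw [PySem.List.pyGet?_natCast]
      exact List.getElem?_eq_getElem ha
    rw [hget]
    have hdrop : gems.drop a = gems[a] :: gems.drop (a+1) := (List.getElem_cons_drop ha).symm
    rw [hdrop, List.take_succ_cons]
    simp only [mkD, Option.getD_some]
    have := ih (a+1) (d.insert gems[a] ((a:Int)+1)) (by omega)
    push_cast at this ⊢
    rw [show (a:Int) + (m+1 : Int) = (a:Int) + 1 + (m:Int) by ring]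
    exact this

-- ===== VERDICT (by name: the statement is the Claim_ definition above) =====
theorem solution_spec : Claim_equal_solution := by
  unfold Claim_equal_solution Spec_solution Pre_solution
  intro gems _ hne
  match gems with
  | g0 :: rest =>
    have hB0 : loopB 0 1 PySem.Set.empty (g0 :: rest) = loopB 1 1 (PySem.Set.add PySem.Set.empty g0) rest := by
      simp [loopB, PySem.Set.empty, PySem.Set.contains]
    set seen1 := PySem.Set.add PySem.Set.empty g0 with hseen1
    set d0 := PySem.Dict.empty.insert g0 (1 : Int) with hd0
    set P := loopB 1 1 seen1 rest with hPdef
    have hseen : ∀ x, PySem.Set.contains seen1 x = d0.contains x := by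
      intro x
      rw [hseen1, hd0, PySem.Dict.contains_insert]
      by_cases hx : x = g0
      · subst hx; simp [PySem.Set.add, PySem.Set.contains, PySem.Set.empty]
      · simp [PySem.Set.add, PySem.Set.contains, PySem.Set.empty, hx]
    have hmain := loopA_main rest 0 1 1 d0 seen1 hseen (by omega)
    norm_num at hmain
    have hsol : solution (g0 :: rest) =
        [(if P = 1 then 1 else (PySem.List.min? ((mkD (rest.take (P - 2).toNat) 1 d0).values) (fun v => v)).getD 0), P] := by
      simp only [solution]
      rw [← hd0, hmain]
    rw [hsol]
    simp only [solution_alt, hB0]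
    by_cases hP1 : P = 1
    · simp [hP1]
    · rw [if_neg hP1, if_neg hP1]
      have hP2 : 2 ≤ P := by
        rcases loopB_cases rest 1 1 seen1 with h | h
        · exact absurd h hP1
        · omega
      have hPle : P ≤ 1 + rest.length := by
        have := loopB_le rest 1 1 seen1
        omega
      -- the pyRange fold equals mkD over the first (P-1) gems
      have hm : ((P - 1).toNat : Int) = P - 1 := by omega
      have hfold := rangeFold_eq_mkD (g0 :: rest) (P - 1).toNat 0 PySem.Dict.empty
          (by simp only [List.length_cons]; omega)
      simp only [Nat.cast_zero, zero_add, List.drop_zero, hm] at hfold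
      have htake : (g0 :: rest).take (P - 1).toNat = g0 :: rest.take (P - 2).toNat := by
        rw [show (P - 1).toNat = (P - 2).toNat + 1 by omega, List.take_succ_cons]
      rw [htake] at hfold
      have hmk : mkD (g0 :: rest.take (P - 2).toNat) 0 PySem.Dict.empty
          = mkD (rest.take (P - 2).toNat) 1 d0 := by
        simp [mkD, hd0]
      rw [hmk] at hfold
      rw [hfold]
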